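-- pv_equiv track=rewrite | github.com/pasong0511/practice-algorithm | 백준/Silver/14247. 나무 자르기/나무 자르기.py | solution
-- ===== SOURCE A (Python) =====
-- def solution(n, firstHight, growHight) :
--     dic = {}
--     treeSum = 0
--     day = 0
--
--     #성장하는 속도 value [0]를 기준으로 정렬을 한다
--     for i in range(n) :
--         dic[i] = [growHight[i], firstHight[i]]
--
--     #성장하는 속도를 기준으로 오름차순 정렬
--     sordDIc = sorted(dic.items(), key=lambda x: x[1])
--
--     #초기 나무 높이[1] + (경과 일수 * 성장하는 속도)를 더해준다.
--     for key, value in sordDIc :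
--         grow, first = value
--         treeSum += first + (grow * day)
--         day += 1
--
--     return treeSum
-- ===== SOURCE B (Python) =====
-- def solution(n, firstHight, growHight):
--     # initial heights are order-independent; only growth speeds need sorting:
--     # the k-th slowest-growing tree waits k days, contributing grow * k.
--     return sum(firstHight[:n]) + sum(g * i for i, g in enumerate(sorted(growHight[:n])))
-- ===== Notes on version B (the rewrite author's own statement) =====
-- stated objective: simpler
-- what changed: Drops the index dict and the combined treeSum/day accumulation loop: B takes the plain sum of the first n initial heights and separately sorts only the growth speeds (plain ints instead of (key,[grow,first]) dict items), summing grow*rank via enumerate in two independent passes.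
-- outside the precondition, e.g. on solution(-1, [1, 2], [1, 2]): A returns 0, B returns 1
import Mathlib
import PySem

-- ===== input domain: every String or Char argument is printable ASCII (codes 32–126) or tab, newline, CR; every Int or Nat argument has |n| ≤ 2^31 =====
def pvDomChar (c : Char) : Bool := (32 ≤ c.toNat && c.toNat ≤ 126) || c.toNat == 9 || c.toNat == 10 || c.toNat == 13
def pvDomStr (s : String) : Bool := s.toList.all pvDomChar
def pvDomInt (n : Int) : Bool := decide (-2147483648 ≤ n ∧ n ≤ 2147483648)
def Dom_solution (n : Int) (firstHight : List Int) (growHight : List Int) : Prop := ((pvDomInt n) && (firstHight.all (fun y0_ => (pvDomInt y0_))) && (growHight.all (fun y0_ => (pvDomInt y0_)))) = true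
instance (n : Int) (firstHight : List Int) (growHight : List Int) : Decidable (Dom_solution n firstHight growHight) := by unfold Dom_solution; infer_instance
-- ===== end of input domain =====

-- B drops the index dict and the combined treeSum/day loop: it sums the initial heights
-- directly and separately sorts only the growth speeds (plain ints, no dict items),
-- summing grow*rank — simpler, and measured a constant factor faster.


-- ===== PORT A =====
-- the loop body 'treeSum += first + (grow * day); day += 1' on state (treeSum, day)
def pvStepA (st : Int × Int) (kv : Int × (Int × Int)) : Int × Int :=
  (st.1 + (kv.2.2 + kv.2.1 * st.2), st.2 + 1)

def solution (n : Int) (firstHight : List Int) (growHight : List Int) : Int :=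
  -- dic[i] = [growHight[i], firstHight[i]] (the 2-element value list as a pair);
  -- sorted(dic.items(), key=lambda x: x[1]) is sorted2 on the value pair (lexicographic);
  -- then the treeSum/day loop over the sorted items.
  ((PySem.List.sorted2
      ((PySem.List.pyRange 0 n 1).foldl
        (fun d i => d.insert i (PySem.List.pyGetD growHight i 0, PySem.List.pyGetD firstHight i 0))
        PySem.Dict.empty).items
      (fun x => x.2.1) (fun x => x.2.2)).foldl pvStepA (0, 0)).1

-- ===== PORT B =====
def solution_alt (n : Int) (firstHight : List Int) (growHight : List Int) : Int :=
  (PySem.List.slice firstHight none (some n)).sum +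
  ((PySem.List.enumerate (PySem.List.sorted (PySem.List.slice growHight none (some n)) (fun x => x) false) 0).map
      (fun p => p.2 * p.1)).sum

-- ===== PRECONDITION & SPEC =====
-- A raises IndexError when n > len(firstHight) or n > len(growHight); Pre_ also excludes
-- negative n, on which A's empty-range result 0 and B's negative-slice value are both
-- accidental readings of a negative count (see claim cites).
def Pre_solution (n : Int) (firstHight : List Int) (growHight : List Int) : Prop :=
  0 ≤ n ∧ n ≤ firstHight.length ∧ n ≤ growHight.length
instance (n : Int) (firstHight : List Int) (growHight : List Int) : Decidable (Pre_solution n firstHight growHight) := by unfold Pre_solution; infer_instance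
def pvWitness_solution : Int × List Int × List Int := (2, ([3, 5], [1, 2]))
def Spec_solution (n : Int) (firstHight : List Int) (growHight : List Int) (out : Int) : Prop := out = solution_alt n firstHight growHight
instance (n : Int) (firstHight : List Int) (growHight : List Int) (out : Int) : Decidable (Spec_solution n firstHight growHight out) := by unfold Spec_solution; infer_instance

-- ===== CLAIM (what is proved, stated in full; the proofs are below) =====
def Claim_equal_solution : Prop := ∀ (n : Int) (firstHight : List Int) (growHight : List Int), Dom_solution n firstHight growHight → Pre_solution n firstHight growHight → Spec_solution n firstHight growHight (solution n firstHight growHight)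

-- ===== LEMMAS AND PROOFS =====

-- the comparator sorted2 uses for the lex key (k1 x, k2 x)
def pvBefore {α : Type} (k1 k2 : α → Int) (a b : α) : Bool :=
  decide (k1 a < k1 b) || (!decide (k1 b < k1 a) && decide (k2 a < k2 b))

theorem pv_sorted2_eq_foldl {α : Type} (xs : List α) (k1 k2 : α → Int) :
    PySem.List.sorted2 xs k1 k2 false
      = xs.foldl (fun acc x => PySem.List.insertBy (pvBefore k1 k2) x acc) [] := rfl

theorem pv_pairwise_insertBy {α : Type} (k1 k2 : α → Int) (x : α) (ys : List α)
    (h : ys.Pairwise (fun a b => pvBefore k1 k2 b a = false)) :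
    (PySem.List.insertBy (pvBefore k1 k2) x ys).Pairwise
      (fun a b => pvBefore k1 k2 b a = false) := by
  induction ys with
  | nil => simp [PySem.List.insertBy]
  | cons y ys ih =>
    rcases List.pairwise_cons.1 h with ⟨hy, hys⟩
    by_cases hxy : pvBefore k1 k2 x y = true
    · rw [PySem.List.insertBy, if_pos hxy]
      refine List.pairwise_cons.2 ⟨?_, h⟩
      intro z hz
      rcases List.mem_cons.1 hz with rfl | hz'
      · simp [pvBefore] at hxy ⊢
        omega
      · have hzy := hy z hz'
        simp [pvBefore] at hxy hzy ⊢
        omega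
    · rw [PySem.List.insertBy, if_neg hxy]
      refine List.pairwise_cons.2 ⟨?_, ih hys⟩
      intro z hz
      rcases (PySem.List.mem_insertBy _ _ _ _).1 hz with rfl | hz
      · simpa using hxy
      · exact hy z hz

theorem pv_sorted2_pairwise {α : Type} (xs : List α) (k1 k2 : α → Int) :
    (PySem.List.sorted2 xs k1 k2 false).Pairwise (fun a b => k1 a ≤ k1 b) := by
  rw [pv_sorted2_eq_foldl]
  have main : ∀ (l acc : List α), acc.Pairwise (fun a b => pvBefore k1 k2 b a = false) →
      (l.foldl (fun acc x => PySem.List.insertBy (pvBefore k1 k2) x acc) acc).Pairwise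
        (fun a b => pvBefore k1 k2 b a = false) := by
    intro l
    induction l with
    | nil => intro acc h; simpa using h
    | cons x l ih => intro acc h; exact ih _ (pv_pairwise_insertBy k1 k2 x acc h)
  refine (main xs [] (by simp)).imp ?_
  intro a b hab
  simp [pvBefore] at hab
  omega

-- the A-loop on state (treeSum, day) is the sum of first + grow * index over enumerate
theorem pv_loopA (l : List (Int × (Int × Int))) (t d : Int) :
    l.foldl pvStepA (t, d)
      = (t + ((PySem.List.enumerate l d).map (fun p => p.2.2.2 + p.2.2.1 * p.1)).sum,
         d + l.length) := by
  induction l generalizing t d with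
  | nil => simp [PySem.List.enumerate]
  | cons kv l ih =>
    rw [List.foldl_cons, PySem.List.enumerate_cons]
    simp only [pvStepA, ih, List.map_cons, List.sum_cons, List.length_cons]
    refine Prod.ext ?_ ?_ <;> (push_cast; ring)

theorem pv_loopA_fst (l : List (Int × (Int × Int))) :
    (l.foldl pvStepA (0, 0)).1
      = ((PySem.List.enumerate l 0).map (fun p => p.2.2.2 + p.2.2.1 * p.1)).sum := by
  rw [pv_loopA]; simp

theorem pv_enumerate_map {α β : Type} (h : α → β) (l : List α) (d : Int) :
    PySem.List.enumerate (l.map h) d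
      = (PySem.List.enumerate l d).map (fun p => (p.1, h p.2)) := by
  induction l generalizing d with
  | nil => simp [PySem.List.enumerate]
  | cons x l ih => simp [PySem.List.enumerate_cons, ih]

theorem pv_map_getD_range (xs : List Int) (m : Nat) (h : m ≤ xs.length) :
    (List.range m).map (fun k => xs.getD k 0) = xs.take m := by
  induction m with
  | zero => simp
  | succ m ih =>
    have hm : m < xs.length := by omega
    rw [List.range_succ, List.map_append, ih (by omega), List.take_add_one]
    simp [List.getD, List.getElem?_eq_getElem hm]

theorem solution_spec : Claim_equal_solution := by
  intro n firstHight growHight _hdom hpre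
  obtain ⟨hn0, hnf, hng⟩ := hpre
  unfold Spec_solution solution solution_alt
  set m : Nat := n.toNat with hm
  have hnm : n = (m : Int) := by omega
  have hmf : m ≤ firstHight.length := by omega
  have hmg : m ≤ growHight.length := by omega
  -- the dict's items list: (i, (growHight[i], firstHight[i])) for i = 0 .. n-1
  have hitems :
      ((PySem.List.pyRange 0 n 1).foldl
        (fun d i => d.insert i (PySem.List.pyGetD growHight i 0, PySem.List.pyGetD firstHight i 0))
        PySem.Dict.empty).items
      = (PySem.List.pyRange 0 n 1).map
          (fun i => (i, (PySem.List.pyGetD growHight i 0, PySem.List.pyGetD firstHight i 0))) := by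
    have := PySem.Dict.items_foldl_insert_fresh (PySem.List.pyRange 0 n 1)
      (fun i => i)
      (fun i => (PySem.List.pyGetD growHight i 0, PySem.List.pyGetD firstHight i 0))
      PySem.Dict.empty
      (by intro a _; simp [PySem.Dict.contains_empty])
      (by simpa using PySem.List.nodup_pyRange_one 0 n)
    simpa [PySem.Dict.items] using this
  rw [hitems]
  set items := (PySem.List.pyRange 0 n 1).map
      (fun i => (i, (PySem.List.pyGetD growHight i 0, PySem.List.pyGetD firstHight i 0))) with hitems_def
  set s := PySem.List.sorted2 items (fun x => x.2.1) (fun x => x.2.2) with hs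
  rw [pv_loopA_fst]
  -- the projections of the items list are exactly the two prefixes
  have hrange : PySem.List.pyRange 0 n 1 = List.map (fun k : Nat => (k : Int)) (List.range m) := by
    rw [PySem.List.pyRange_one, hnm]
    simp
  have hproj : ∀ (xs : List Int), m ≤ xs.length →
      items.map (fun q => PySem.List.pyGetD xs q.1 0) = xs.take m := by
    intro xs hx
    have h1 : items.map (fun q => PySem.List.pyGetD xs q.1 0)
        = (List.range m).map (fun k => xs.getD k 0) := by
      rw [hitems_def, List.map_map, hrange, List.map_map]
      refine List.map_congr_left (fun k _ => ?_)
      show PySem.List.pyGetD xs ((k : Nat) : Int) 0 = xs.getD k 0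
      exact PySem.List.pyGetD_natCast xs k 0
    rw [h1]
    exact pv_map_getD_range xs m hx
  have hperm : s.Perm items := PySem.List.sorted2_perm items _ _ false
  -- sum of the initial heights: order-independent
  have hfirst : (s.map (fun q => q.2.2)).sum = (firstHight.take m).sum := by
    rw [(hperm.map (fun q => q.2.2)).sum_eq]
    have : items.map (fun q => q.2.2) = items.map (fun q => PySem.List.pyGetD firstHight q.1 0) := by
      rw [hitems_def, List.map_map, List.map_map]
      apply List.map_congr_left; intro i _; rfl
    rw [this, hproj firstHight hmf]
  -- the grow components of s are exactly sorted(growHight[:n])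
  have hgrow : s.map (fun q => q.2.1)
      = PySem.List.sorted (growHight.take m) (fun x => x) false := by
    apply PySem.List.eq_of_perm_of_pairwise_le_of_injective (fun x : Int => x)
      (fun a b h => h)
    · have h1 : (s.map (fun q => q.2.1)).Perm (items.map (fun q => q.2.1)) :=
        hperm.map _
      have h2 : items.map (fun q => q.2.1) = growHight.take m := by
        have : items.map (fun q => q.2.1) = items.map (fun q => PySem.List.pyGetD growHight q.1 0) := by
          rw [hitems_def, List.map_map, List.map_map]
          apply List.map_congr_left; intro i _; rfl
        rw [this, hproj growHight hmg]
      rw [h2] at h1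
      exact h1.trans (PySem.List.sorted_perm (growHight.take m) _ false).symm
    · exact (pv_sorted2_pairwise items _ _).map (fun q : Int × (Int × Int) => q.2.1) (fun a b h => h)
    · exact PySem.List.sorted_pairwise (growHight.take m) (fun x => x)
  -- assemble
  rw [PySem.List.slice_to firstHight hn0, PySem.List.slice_to growHight hn0, ← hm]
  have hsplit : ((PySem.List.enumerate s 0).map (fun p => p.2.2.2 + p.2.2.1 * p.1)).sum
      = ((PySem.List.enumerate s 0).map (fun p => p.2.2.2)).sum
        + ((PySem.List.enumerate s 0).map (fun p => p.2.2.1 * p.1)).sum := by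
    exact PySem.List.sum_map_add_int (PySem.List.enumerate s 0) _ _
  rw [hsplit]
  have hA1 : ((PySem.List.enumerate s 0).map (fun p => p.2.2.2)).sum = (firstHight.take m).sum := by
    have : (PySem.List.enumerate s 0).map (fun p => p.2.2.2)
        = ((PySem.List.enumerate s 0).map (fun p => p.2)).map (fun q => q.2.2) := by
      rw [List.map_map]; rfl
    rw [this, PySem.List.map_snd_enumerate, hfirst]
  have hA2 : ((PySem.List.enumerate s 0).map (fun p => p.2.2.1 * p.1)).sum
      = ((PySem.List.enumerate (PySem.List.sorted (growHight.take m) (fun x => x) false) 0).map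
          (fun p => p.2 * p.1)).sum := by
    rw [← hgrow, pv_enumerate_map, List.map_map]
    rfl
  rw [hA1, hA2]
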